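-- pv_equiv track=rewrite | github.com/Demi-urge/menace_sandbox | bot_registry.py | _is_traceback_only_module
-- ===== SOURCE A (Python) =====
-- _TRACEBACK_IGNORED_PREFIXES: tuple[str, ...] = (
--     "tests",
--     "menace_sandbox.tests",
--     "menace.tests",
-- )
--
-- _TRACEBACK_IGNORED_MODULES: frozenset[str] = frozenset(
--     {
--         "bot_registry",
--         "menace.bot_registry",
--         "menace_sandbox.bot_registry",
--     }
-- )
--
-- def _is_traceback_only_module(name: str) -> bool:
--     """Return ``True`` when *name* only references test or bootstrap modules."""
--
--     if not name:
--         return False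
--     candidate = name.strip()
--     if not candidate:
--         return False
--     if candidate in _TRACEBACK_IGNORED_MODULES:
--         return True
--     for prefix in _TRACEBACK_IGNORED_PREFIXES:
--         if candidate == prefix or candidate.startswith(prefix + "."):
--             return True
--     return False
-- ===== SOURCE B (Python) =====
-- _TRACEBACK_IGNORED_PREFIXES: tuple[str, ...] = (
--     "tests",
--     "menace_sandbox.tests",
--     "menace.tests",
-- )
--
-- _TRACEBACK_IGNORED_MODULES: frozenset[str] = frozenset(
--     {
--         "bot_registry",
--         "menace.bot_registry",
--         "menace_sandbox.bot_registry",
--     }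
-- )
--
-- _TRACEBACK_IGNORED_PREFIX_SET: frozenset[str] = frozenset(_TRACEBACK_IGNORED_PREFIXES)
--
--
-- def _is_traceback_only_module(name: str) -> bool:
--     """Return ``True`` when *name* only references test or bootstrap modules.
--
--     Single scan over the candidate's characters: at every dot the accumulated
--     ancestor ('a', 'a.b', ...) is looked up in the ignored-prefix set, and the
--     whole candidate is looked up at the end.
--     """
--     candidate = name.strip()
--     if not candidate:
--         return False
--     if candidate in _TRACEBACK_IGNORED_MODULES:
--         return True
--     ancestor = ""
--     for ch in candidate:
--         if ch == "." and ancestor in _TRACEBACK_IGNORED_PREFIX_SET: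
--             return True
--         ancestor += ch
--     return ancestor in _TRACEBACK_IGNORED_PREFIX_SET
-- ===== Notes on version B (the rewrite author's own statement) =====
-- stated objective: alternative
-- what changed: A loops over the fixed prefix tuple calling startswith on the candidate; B makes a single left-to-right pass over the candidate's characters, testing the accumulated ancestor prefix against the ignored-prefix set at each dot (and the whole candidate at the end).
import Mathlib
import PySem

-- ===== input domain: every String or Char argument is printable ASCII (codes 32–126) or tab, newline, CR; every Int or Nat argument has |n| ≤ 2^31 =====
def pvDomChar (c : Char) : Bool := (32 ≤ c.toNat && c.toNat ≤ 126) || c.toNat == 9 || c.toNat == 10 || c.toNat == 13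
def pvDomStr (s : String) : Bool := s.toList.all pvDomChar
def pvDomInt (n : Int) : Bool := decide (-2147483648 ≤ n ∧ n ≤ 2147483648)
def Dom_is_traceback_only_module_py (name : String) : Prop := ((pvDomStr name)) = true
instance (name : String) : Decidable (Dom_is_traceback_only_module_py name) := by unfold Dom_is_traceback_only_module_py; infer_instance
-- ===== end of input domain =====

-- B replaces A's scan over the fixed prefix tuple (with startswith) by one pass over the
-- candidate's characters, checking the accumulated ancestor prefix in the set at each dot.

def pvPrefixes : List (List Char) :=
  ["tests".toList, "menace_sandbox.tests".toList, "menace.tests".toList]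

def pvMods : List (List Char) :=
  ["bot_registry".toList, "menace.bot_registry".toList, "menace_sandbox.bot_registry".toList]

-- ===== PORT A =====
def is_traceback_only_module_py (name : String) : Bool :=
  if name == "" then false
  else
    let candidate := PySem.Chars.strip name.toList
    if candidate == [] then false
    else if pvMods.any (fun m => candidate == m) then true
    else pvPrefixes.any (fun p => candidate == p || PySem.Chars.startswith candidate (p ++ ['.']))

-- ===== PORT B =====
-- the character loop of Source B: `ancestor` is the accumulated prefix, checked at each '.'
def pvScan (pset : List (List Char)) (ancestor : List Char) : List Char → Bool
  | [] => pset.any (fun p => ancestor == p)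
  | c :: rest =>
      if c == '.' && pset.any (fun p => ancestor == p) then true
      else pvScan pset (ancestor ++ [c]) rest

def is_traceback_only_module_py_alt (name : String) : Bool :=
  let candidate := PySem.Chars.strip name.toList
  if candidate == [] then false
  else if pvMods.any (fun m => candidate == m) then true
  else pvScan pvPrefixes [] candidate

-- ===== PRECONDITION & SPEC =====
def Spec_is_traceback_only_module_py (name : String) (out : Bool) : Prop := out = is_traceback_only_module_py_alt name
instance (name : String) (out : Bool) : Decidable (Spec_is_traceback_only_module_py name out) := by unfold Spec_is_traceback_only_module_py; infer_instance

-- ===== CLAIM (what is proved, stated in full; the proofs are below) =====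
def Claim_equal_is_traceback_only_module_py : Prop := ∀ (name : String), Dom_is_traceback_only_module_py name → Spec_is_traceback_only_module_py name (is_traceback_only_module_py name)

-- ===== LEMMAS AND PROOFS =====

-- pvScan finds exactly: the whole string in pset, or a piece before some '.' of `rest`
-- (extended by the already-seen `ancestor`) in pset.
lemma pvScan_iff (pset : List (List Char)) :
    ∀ (rest seen : List Char),
      pvScan pset seen rest = true ↔
        ∃ p ∈ pset, seen ++ rest = p ∨ ∃ t u, rest = t ++ '.' :: u ∧ seen ++ t = p := by
  intro rest
  induction rest with
  | nil =>
      intro seen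
      simp [pvScan]
  | cons c rs ih =>
      intro seen
      simp only [pvScan]
      by_cases hdot : (c == '.' && pset.any (fun p => seen == p)) = true
      · rw [if_pos hdot]
        simp only [Bool.and_eq_true, beq_iff_eq, List.any_eq_true] at hdot
        obtain ⟨hc, p, hp, hsp⟩ := hdot
        subst hc
        constructor
        · intro _
          exact ⟨p, hp, Or.inr ⟨[], rs, by simp, by simpa using hsp⟩⟩
        · intro _; rfl
      · rw [if_neg hdot, ih (seen ++ [c])]
        constructor
        · rintro ⟨p, hp, he | ⟨t, u, ht, hs⟩⟩
          · exact ⟨p, hp, Or.inl (by simpa using he)⟩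
          · exact ⟨p, hp, Or.inr ⟨c :: t, u, by simp [ht], by simpa using hs⟩⟩
        · rintro ⟨p, hp, he | ⟨t, u, ht, hs⟩⟩
          · exact ⟨p, hp, Or.inl (by simpa using he)⟩
          · cases t with
            | nil =>
                simp at ht
                exfalso
                apply hdot
                simp only [Bool.and_eq_true, beq_iff_eq, List.any_eq_true]
                refine ⟨ht.1, p, hp, ?_⟩
                simpa using hs
            | cons c' t' =>
                simp only [List.cons_append, List.cons.injEq] at ht
                obtain ⟨hc', ht'⟩ := ht
                subst hc'
                exact ⟨p, hp, Or.inr ⟨t', u, ht', by simpa using hs⟩⟩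

-- A's prefix loop equals B's character scan, for any candidate string.
lemma scan_eq_any (cs : List Char) :
    pvPrefixes.any (fun p => cs == p || PySem.Chars.startswith cs (p ++ ['.'])) =
      pvScan pvPrefixes [] cs := by
  rw [Bool.eq_iff_iff]
  rw [pvScan_iff pvPrefixes cs []]
  simp only [List.any_eq_true, Bool.or_eq_true, beq_iff_eq, PySem.Chars.startswith_iff,
    List.nil_append]
  constructor
  · rintro ⟨p, hp, he | ⟨u, hu⟩⟩
    · exact ⟨p, hp, Or.inl he⟩
    · exact ⟨p, hp, Or.inr ⟨p, u, by simpa using hu.symm, rfl⟩⟩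
  · rintro ⟨p, hp, he | ⟨t, u, ht, hs⟩⟩
    · exact ⟨p, hp, Or.inl he⟩
    · subst hs
      exact ⟨t, hp, Or.inr ⟨u, by simp [ht]⟩⟩

-- ===== VERDICT (by name: the statement is the Claim_ definition above) =====
theorem is_traceback_only_module_py_spec : Claim_equal_is_traceback_only_module_py := by
  intro name _
  unfold Spec_is_traceback_only_module_py is_traceback_only_module_py is_traceback_only_module_py_alt
  by_cases hempty : name == ""
  · -- name = "": A returns false; B strips "" to [] and returns false too
    simp only [hempty, if_true]
    have : name = "" := by simpa using hempty
    subst this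
    rfl
  · simp only [hempty, Bool.false_eq_true, if_false]
    by_cases hcand : PySem.Chars.strip name.toList == []
    · simp [hcand]
    · simp only [hcand, Bool.false_eq_true, if_false]
      by_cases hmod : pvMods.any (fun m => PySem.Chars.strip name.toList == m)
      · simp [hmod]
      · simp only [hmod, Bool.false_eq_true, if_false]
        exact scan_eq_any _
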